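-- pv_equiv track=rewrite | github.com/SaiGuruInukurthi/Cryptography_Assignment | backend/playfair.py | _prepare_text
-- ===== SOURCE A (Python) =====
-- def _normalize_text(text: str) -> str:
--     """Keep letters only, lowercase, and map j -> i."""
--     cleaned = "".join(ch for ch in text.lower() if ch.isalpha())
--     return cleaned.replace("j", "i")
--
-- def _prepare_text(text: str) -> list[tuple[str, str]]:
--     """Create digraphs: split doubles with 'x', pad odd length."""
--     text = _normalize_text(text)
--     digraphs: list[tuple[str, str]] = []
--     i = 0
--     while i < len(text):
--         a = text[i]
--         if i + 1 < len(text):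
--             b = text[i + 1]
--             if a == b:
--                 digraphs.append((a, "x"))
--                 i += 1
--             else:
--                 digraphs.append((a, b))
--                 i += 2
--         else:
--             digraphs.append((a, "x"))
--             i += 1
--     return digraphs
-- ===== SOURCE B (Python) =====
-- def _normalize_text(text: str) -> str:
--     """Keep letters only, lowercase, and map j -> i."""
--     cleaned = "".join(ch for ch in text.lower() if ch.isalpha())
--     return cleaned.replace("j", "i")
--
-- def _prepare_text(text: str) -> list[tuple[str, str]]:
--     """Two-stage: build a flat padded string with 'x' fillers, then chunk it into pairs."""
--     flat: list[str] = []
--     for ch in _normalize_text(text):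
--         if len(flat) % 2 == 1 and flat[-1] == ch:
--             flat.append("x")
--         flat.append(ch)
--     if len(flat) % 2 == 1:
--         flat.append("x")
--     return [(flat[i], flat[i + 1]) for i in range(0, len(flat), 2)]
-- ===== Notes on version B (the rewrite author's own statement) =====
-- stated objective: alternative
-- what changed: Replaced A's one-pass index walk with variable stride that emits pairs directly by a staged construction: first build a flat expanded character sequence (inserting 'x' at a pair boundary when a letter would repeat inside a pair, padding to even length), then chunk that flat sequence into 2-tuples in a second pass.
import Mathlib
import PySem

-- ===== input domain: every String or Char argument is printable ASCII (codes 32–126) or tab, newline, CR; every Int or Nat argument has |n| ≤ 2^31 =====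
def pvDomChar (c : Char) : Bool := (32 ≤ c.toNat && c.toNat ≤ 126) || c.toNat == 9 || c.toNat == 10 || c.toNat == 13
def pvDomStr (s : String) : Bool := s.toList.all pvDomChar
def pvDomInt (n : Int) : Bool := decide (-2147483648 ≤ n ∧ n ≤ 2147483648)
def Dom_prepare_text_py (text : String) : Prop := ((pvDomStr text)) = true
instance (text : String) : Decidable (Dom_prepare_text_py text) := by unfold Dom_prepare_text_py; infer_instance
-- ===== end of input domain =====

-- B replaces A's one-pass index walk (stride 1 or 2) by a staged construction: a flat expanded padded sequence, then chunking into pairs; objective: alternative (same cost).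


-- ===== PORT A =====
-- _normalize_text, shared verbatim by both Pythons: lowercase, keep letters, replace "j" -> "i"
def normalize_text_chars (text : String) : List Char :=
  PySem.Chars.replace ((PySem.Chars.lower text.toList).filter PySem.Chars.isalpha) ['j'] ['i']

-- the while loop of A: i advances by 1 (double letter / lone tail) or by 2
def prepare_loopA : List Char → List (String × String)
  | [] => []
  | [a] => [(String.ofList [a], "x")]
  | a :: b :: rest =>
      if a == b then (String.ofList [a], "x") :: prepare_loopA (b :: rest)
      else (String.ofList [a], String.ofList [b]) :: prepare_loopA rest

def prepare_text_py (text : String) : List (String × String) :=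
  prepare_loopA (normalize_text_chars text)

-- ===== PORT B =====
-- B's first loop: build the flat expanded sequence (flat[-1] on an odd-length flat is its last element)
def expandLoop (flat : List Char) : List Char → List Char
  | [] => flat
  | ch :: rest =>
      if flat.length % 2 == 1 && flat.getLast? == some ch then
        expandLoop (flat ++ ['x', ch]) rest
      else
        expandLoop (flat ++ [ch]) rest

-- B's second pass: the comprehension over range(0, len(flat), 2), taking flat[i], flat[i+1]
def chunkPairs : List Char → List (String × String)
  | a :: b :: rest => (String.ofList [a], String.ofList [b]) :: chunkPairs rest
  | _ => []

def prepare_text_py_alt (text : String) : List (String × String) :=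
  let flat := expandLoop [] (normalize_text_chars text)
  let flat := if flat.length % 2 == 1 then flat ++ ['x'] else flat
  chunkPairs flat

-- ===== PRECONDITION & SPEC =====
def Spec_prepare_text_py (text : String) (out : List (String × String)) : Prop := out = prepare_text_py_alt text
instance (text : String) (out : List (String × String)) : Decidable (Spec_prepare_text_py text out) := by unfold Spec_prepare_text_py; infer_instance

-- ===== CLAIM (what is proved, stated in full; the proofs are below) =====
def Claim_equal_prepare_text_py : Prop := ∀ (text : String), Dom_prepare_text_py text → Spec_prepare_text_py text (prepare_text_py text)

-- ===== LEMMAS AND PROOFS =====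
-- pad-then-chunk, as a function of the flat sequence
def postChunk (f : List Char) : List (String × String) :=
  chunkPairs (if f.length % 2 == 1 then f ++ ['x'] else f)

lemma chunkPairs_append : ∀ (flat r : List Char), flat.length % 2 = 0 →
    chunkPairs (flat ++ r) = chunkPairs flat ++ chunkPairs r
  | [], r, _ => by simp [chunkPairs]
  | [a], r, h => by simp at h
  | a :: b :: t, r, h => by
      have ht : t.length % 2 = 0 := by simp at h; omega
      simp [chunkPairs, chunkPairs_append t r ht]

-- Invariant of B's first loop: from an even-length flat, post-processing yields
-- chunkPairs flat ++ A's loop on the rest; with one held-back letter p appended,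
-- it yields chunkPairs flat ++ A's loop on p :: rest.
lemma expandLoop_eq (l : List Char) :
    (∀ flat, flat.length % 2 = 0 → postChunk (expandLoop flat l) = chunkPairs flat ++ prepare_loopA l) ∧
    (∀ flat p, flat.length % 2 = 0 →
      postChunk (expandLoop (flat ++ [p]) l) = chunkPairs flat ++ prepare_loopA (p :: l)) := by
  induction l with
  | nil =>
    refine ⟨fun flat h => ?_, fun flat p h => ?_⟩
    · simp [expandLoop, postChunk, prepare_loopA, h]
    · have h1 : (flat.length + 1) % 2 = 1 := by omega
      simp [expandLoop, postChunk, prepare_loopA, h1,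
        chunkPairs_append flat [p, 'x'] h, chunkPairs]
  | cons ch rest ih =>
    refine ⟨fun flat h => ?_, fun flat p h => ?_⟩
    · have hc : (flat.length % 2 == 1) = false := by simp [h]
      rw [show expandLoop flat (ch :: rest) = expandLoop (flat ++ [ch]) rest by
        simp [expandLoop, hc]]
      exact ih.2 flat ch h
    · have hlen : (flat ++ [p]).length % 2 = 1 := by
        simp [List.length_append]; omega
      have hlast : (flat ++ [p]).getLast? = some p := by simp
      by_cases hpc : p = ch
      · subst hpc
        rw [show expandLoop (flat ++ [p]) (p :: rest)
              = expandLoop ((flat ++ [p, 'x']) ++ [p]) rest by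
          have h1 : (flat.length + 1) % 2 = 1 := by omega
          simp [expandLoop, h1, hlast]]
        have h2 : (flat ++ [p, 'x']).length % 2 = 0 := by
          simp [List.length_append]; omega
        rw [ih.2 (flat ++ [p, 'x']) p h2,
          chunkPairs_append flat [p, 'x'] h]
        simp [prepare_loopA, chunkPairs]
      · rw [show expandLoop (flat ++ [p]) (ch :: rest)
              = expandLoop ((flat ++ [p, ch])) rest by
          have h1 : (flat.length + 1) % 2 = 1 := by omega
          simp [expandLoop, h1, hlast, hpc, List.append_assoc]]
        have h2 : (flat ++ [p, ch]).length % 2 = 0 := by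
          simp [List.length_append]; omega
        rw [ih.1 (flat ++ [p, ch]) h2, chunkPairs_append flat [p, ch] h]
        simp [prepare_loopA, hpc, chunkPairs]

-- ===== VERDICT (by name: the statement is the Claim_ definition above) =====
theorem prepare_text_py_spec : Claim_equal_prepare_text_py := by
  intro text _
  unfold Spec_prepare_text_py prepare_text_py prepare_text_py_alt
  have := ((expandLoop_eq (normalize_text_chars text)).1 [] (by simp)).symm
  simpa [postChunk, chunkPairs] using this
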